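-- pv_equiv track=rewrite | github.com/agucova/lawful-rtd | summarize_book_batched.py | chunk_blocks_grouped_by_h1
-- ===== SOURCE A (Python) =====
-- from typing import List, Tuple, Dict
--
-- MAX_CHARS_PER_CHUNK = 15000
--
-- def chunk_blocks_grouped_by_h1(
--     blocks: List[Tuple[str, str]],
--     max_chars: int = MAX_CHARS_PER_CHUNK
-- ) -> List[Tuple[str, List[str]]]:
--     """
--     Produce a list of chunks, each chunk = (heading_context, [list_of_block_html]).
--     We never mix blocks with different <h1> contexts in the same chunk,
--     and we also enforce the max_chars limit. (Heading is always a string.)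
--     """
--     chunks: List[Tuple[str, List[str]]] = []
--
--     # Start with an empty string—never None—so we avoid type-check errors
--     current_context: str = ""
--     current_blocks: List[str] = []
--     current_len = 0
--
--     for (ctx, block_html) in blocks:
--         block_len = len(block_html)
--         if ctx != current_context or (current_len + block_len > max_chars):
--             if current_blocks:
--                 chunks.append((current_context, current_blocks))
--             current_context = ctx
--             current_blocks = [block_html]
--             current_len = block_len
--         else:
--             current_blocks.append(block_html)
--             current_len += block_len
--
--     # final chunk
--     if current_blocks:
--         chunks.append((current_context, current_blocks))
--
--     return chunks
-- ===== SOURCE B (Python) =====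
-- MAX_CHARS_PER_CHUNK = 15000
--
-- def chunk_blocks_grouped_by_h1(blocks, max_chars=MAX_CHARS_PER_CHUNK):
--     """Split into maximal runs of consecutive equal context, then greedily
--     pack each run into chunks of at most max_chars (a lone oversized block
--     still forms its own chunk)."""
--     out = []
--     i = 0
--     n = len(blocks)
--     while i < n:
--         ctx = blocks[i][0]
--         j = i
--         while j < n and blocks[j][0] == ctx:
--             j += 1
--         cur, cur_len = [], 0
--         for k in range(i, j):
--             html = blocks[k][1]
--             if cur and cur_len + len(html) > max_chars:
--                 out.append((ctx, cur))
--                 cur, cur_len = [], 0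
--             cur.append(html)
--             cur_len += len(html)
--         out.append((ctx, cur))
--         i = j
--     return out
-- ===== Notes on version B (the rewrite author's own statement) =====
-- stated objective: alternative
-- what changed: Instead of one fold carrying (context, current chunk, length) state with a combined flush condition, B first splits the list into maximal runs of consecutive equal context and then greedily packs each run by size alone.
import Mathlib
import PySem

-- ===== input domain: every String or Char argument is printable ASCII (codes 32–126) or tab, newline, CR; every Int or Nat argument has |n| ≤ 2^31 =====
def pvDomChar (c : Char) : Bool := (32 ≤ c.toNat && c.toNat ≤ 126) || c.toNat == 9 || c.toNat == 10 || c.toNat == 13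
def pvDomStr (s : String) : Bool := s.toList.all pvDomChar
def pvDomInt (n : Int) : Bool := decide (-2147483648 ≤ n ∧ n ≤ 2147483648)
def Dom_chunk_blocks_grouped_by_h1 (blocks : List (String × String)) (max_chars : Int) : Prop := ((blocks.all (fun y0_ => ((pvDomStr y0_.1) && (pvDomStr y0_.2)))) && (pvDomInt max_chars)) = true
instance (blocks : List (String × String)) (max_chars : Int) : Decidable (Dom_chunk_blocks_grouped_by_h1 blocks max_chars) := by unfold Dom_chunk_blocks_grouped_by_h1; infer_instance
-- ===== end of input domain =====

-- B replaces A's single fold carrying (context, chunk, length) state by a two-level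
-- decomposition: split into maximal runs of equal context, then greedily pack each run
-- by size (objective: alternative; same output, same O(n) cost).

-- ===== PORT A =====
-- one loop iteration of A: state = (chunks, current_context, current_blocks, current_len)
def stepA (max_chars : Int)
    (st : List (String × List String) × String × List String × Int)
    (p : String × String) : List (String × List String) × String × List String × Int :=
  let (chunks, cc, cb, cl) := st
  let (ctx, bh) := p
  let bl := PySem.Str.len bh
  if ctx ≠ cc ∨ cl + bl > max_chars then
    ((if cb.isEmpty then chunks else chunks ++ [(cc, cb)]), ctx, [bh], bl)
  else
    (chunks, cc, cb ++ [bh], cl + bl)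

def chunk_blocks_grouped_by_h1 (blocks : List (String × String)) (max_chars : Int) : List (String × List String) :=
  let st := blocks.foldl (stepA max_chars) ([], "", [], 0)
  -- final chunk
  if st.2.2.1.isEmpty then st.1 else st.1 ++ [(st.2.1, st.2.2.1)]

-- ===== PORT B =====
-- greedy packing of one run of block htmls, all sharing context ctx (Source B's inner for-loop)
def packRun (max_chars : Int) (ctx : String) (cur : List String) (cur_len : Int) :
    List String → List (String × List String)
  | [] => [(ctx, cur)]
  | h :: t =>
    let hl := PySem.Str.len h
    if cur ≠ [] ∧ cur_len + hl > max_chars then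
      (ctx, cur) :: packRun max_chars ctx [h] hl t
    else
      packRun max_chars ctx (cur ++ [h]) (cur_len + hl) t

-- Source B's outer while loop: take the maximal run of the head's context, pack it, recurse
def chunk_blocks_grouped_by_h1_alt (blocks : List (String × String)) (max_chars : Int) : List (String × List String) :=
  match blocks with
  | [] => []
  | (ctx, h) :: rest =>
    let run := rest.takeWhile (fun p => p.1 == ctx)
    let rest' := rest.dropWhile (fun p => p.1 == ctx)
    packRun max_chars ctx [] 0 (h :: run.map Prod.snd) ++ chunk_blocks_grouped_by_h1_alt rest' max_chars
termination_by blocks.length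
decreasing_by
  simp only [List.length_cons]
  exact Nat.lt_succ_of_le (List.length_dropWhile_le _ _)

-- ===== PRECONDITION & SPEC =====
def Spec_chunk_blocks_grouped_by_h1 (blocks : List (String × String)) (max_chars : Int) (out : List (String × List String)) : Prop := out = chunk_blocks_grouped_by_h1_alt blocks max_chars
instance (blocks : List (String × String)) (max_chars : Int) (out : List (String × List String)) : Decidable (Spec_chunk_blocks_grouped_by_h1 blocks max_chars out) := by unfold Spec_chunk_blocks_grouped_by_h1; infer_instance

-- ===== CLAIM (what is proved, stated in full; the proofs are below) =====
def Claim_equal_chunk_blocks_grouped_by_h1 : Prop := ∀ (blocks : List (String × String)) (max_chars : Int), Dom_chunk_blocks_grouped_by_h1 blocks max_chars → Spec_chunk_blocks_grouped_by_h1 blocks max_chars (chunk_blocks_grouped_by_h1 blocks max_chars)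

-- ===== LEMMAS AND PROOFS =====

-- A's epilogue ("final chunk") as a function of the loop state
def finA (st : List (String × List String) × String × List String × Int) : List (String × List String) :=
  if st.2.2.1.isEmpty then st.1 else st.1 ++ [(st.2.1, st.2.2.1)]

lemma finA_acc (chunks a : List (String × List String)) (cc : String) (cb : List String) (cl : Int) :
    finA (chunks ++ a, cc, cb, cl) = chunks ++ finA (a, cc, cb, cl) := by
  by_cases h : cb.isEmpty <;> simp [finA, h]

lemma packRun_nil (m : Int) (ctx : String) (cur : List String) (cl : Int) :
    packRun m ctx cur cl [] = [(ctx, cur)] := rfl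

lemma packRun_cons_pos (m : Int) (ctx : String) (cur : List String) (cl : Int) (h : String)
    (t : List String) (hcur : cur ≠ []) (hlen : cl + PySem.Str.len h > m) :
    packRun m ctx cur cl (h :: t) = (ctx, cur) :: packRun m ctx [h] (PySem.Str.len h) t := by
  simp only [packRun]
  rw [if_pos ⟨hcur, hlen⟩]

lemma packRun_cons_neg (m : Int) (ctx : String) (cur : List String) (cl : Int) (h : String)
    (t : List String) (hlen : ¬ cl + PySem.Str.len h > m) :
    packRun m ctx cur cl (h :: t) = packRun m ctx (cur ++ [h]) (cl + PySem.Str.len h) t := by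
  simp only [packRun]
  rw [if_neg (by tauto)]

lemma packRun_cons_empty (m : Int) (ctx : String) (cl : Int) (h : String) (t : List String) :
    packRun m ctx [] cl (h :: t) = packRun m ctx [h] (cl + PySem.Str.len h) t := by
  simp only [packRun]
  rw [if_neg (by simp), List.nil_append]

lemma alt_nil (m : Int) : chunk_blocks_grouped_by_h1_alt [] m = [] := by
  rw [chunk_blocks_grouped_by_h1_alt]

lemma alt_cons (ctx h : String) (rest : List (String × String)) (m : Int) :
    chunk_blocks_grouped_by_h1_alt ((ctx, h) :: rest) m =
      packRun m ctx [] 0 (h :: (rest.takeWhile (fun p => p.1 == ctx)).map Prod.snd)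
        ++ chunk_blocks_grouped_by_h1_alt (rest.dropWhile (fun p => p.1 == ctx)) m := by
  rw [chunk_blocks_grouped_by_h1_alt]

lemma foldA_acc (m : Int) (bl : List (String × String)) (chunks : List (String × List String))
    (cc : String) (cb : List String) (cl : Int) :
    List.foldl (stepA m) (chunks, cc, cb, cl) bl =
      (chunks ++ (List.foldl (stepA m) ([], cc, cb, cl) bl).1,
       (List.foldl (stepA m) ([], cc, cb, cl) bl).2) := by
  induction bl generalizing chunks cc cb cl with
  | nil => simp
  | cons p t ih =>
    obtain ⟨ctx, bh⟩ := p
    simp only [List.foldl_cons, stepA]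
    by_cases hc : ctx ≠ cc ∨ cl + PySem.Str.len bh > m
    · rw [if_pos hc, if_pos hc]
      by_cases he : cb.isEmpty
      · rw [if_pos he, if_pos he, ih]
      · rw [if_neg he, if_neg he, List.nil_append, ih, ih [(cc, cb)]]
        simp [List.append_assoc]
    · rw [if_neg hc, if_neg hc]
      exact ih ..

lemma main_run (m : Int) (bl : List (String × String)) :
    ∀ (cc : String) (cb : List String) (cl : Int), cb ≠ [] →
    finA (List.foldl (stepA m) ([], cc, cb, cl) bl) =
      packRun m cc cb cl ((bl.takeWhile (fun p => p.1 == cc)).map Prod.snd)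
        ++ chunk_blocks_grouped_by_h1_alt (bl.dropWhile (fun p => p.1 == cc)) m := by
  induction bl with
  | nil =>
    intro cc cb cl h
    simp [finA, List.isEmpty_iff, h, packRun_nil, alt_nil]
  | cons p t ih =>
    intro cc cb cl h
    obtain ⟨ctx, bh⟩ := p
    rw [List.foldl_cons]
    by_cases hctx : ctx = cc
    · subst hctx
      rw [List.takeWhile_cons_of_pos (by simp), List.dropWhile_cons_of_pos (by simp), List.map_cons]
      by_cases hlen : cl + PySem.Str.len bh > m
      · have hs : stepA m ([], ctx, cb, cl) (ctx, bh) = ([(ctx, cb)], ctx, [bh], PySem.Str.len bh) := by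
          simp only [stepA]
          rw [if_pos (Or.inr hlen), if_neg (by simpa [List.isEmpty_iff] using h), List.nil_append]
        rw [hs, foldA_acc, finA_acc, ih ctx [bh] (PySem.Str.len bh) (by simp),
            packRun_cons_pos m ctx cb cl bh _ h hlen]
        simp
      · have hs : stepA m ([], ctx, cb, cl) (ctx, bh) = ([], ctx, cb ++ [bh], cl + PySem.Str.len bh) := by
          simp only [stepA]
          rw [if_neg (not_or.mpr ⟨by simp, hlen⟩)]
        rw [hs, ih ctx (cb ++ [bh]) (cl + PySem.Str.len bh) (by simp),
            packRun_cons_neg m ctx cb cl bh _ hlen]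
    · rw [List.takeWhile_cons_of_neg (by simp [hctx]), List.dropWhile_cons_of_neg (by simp [hctx]),
          List.map_nil, packRun_nil, alt_cons]
      have hs : stepA m ([], cc, cb, cl) (ctx, bh) = ([(cc, cb)], ctx, [bh], PySem.Str.len bh) := by
        simp only [stepA]
        rw [if_pos (Or.inl hctx), if_neg (by simpa [List.isEmpty_iff] using h), List.nil_append]
      rw [hs, foldA_acc, finA_acc, ih ctx [bh] (PySem.Str.len bh) (by simp),
          packRun_cons_empty, zero_add]

-- ===== VERDICT (by name: the statement is the Claim_ definition above) =====
theorem chunk_blocks_grouped_by_h1_spec : Claim_equal_chunk_blocks_grouped_by_h1 := by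
  intro blocks m _
  unfold Spec_chunk_blocks_grouped_by_h1
  show finA (blocks.foldl (stepA m) ([], "", [], 0)) = _
  match blocks with
  | [] => simp [finA, alt_nil]
  | (ctx, bh) :: t =>
    have hstep : stepA m ([], "", [], 0) (ctx, bh) = ([], ctx, [bh], PySem.Str.len bh) := by
      simp only [stepA]
      by_cases hc : ctx ≠ "" ∨ (0 : Int) + PySem.Str.len bh > m
      · rw [if_pos hc]
        simp
      · rw [if_neg hc]
        rcases not_or.mp hc with ⟨h1, h2⟩
        rw [not_ne_iff.mp h1, zero_add, List.nil_append]
    rw [List.foldl_cons, hstep, main_run m t ctx [bh] (PySem.Str.len bh) (by simp),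
        alt_cons, packRun_cons_empty, zero_add]
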